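-- pv_equiv track=rewrite | github.com/helder53/Problem_Solving | Programmers/Level2/기능개발.py | solution
-- ===== SOURCE A (Python) =====
-- from collections import deque
-- from collections import deque
--
-- def solution(progresses, speeds):
--     answer = []
--     p = deque([x for x in progresses])
--     s = deque([x for x in speeds])
--
--     while True:
--         if sum(answer) == len(progresses):
--             break
--
--         for i in range(len(p)):
--             p[i] += s[i]
--
--         count = 0
--         while p:
--             if p[0] >= 100:
--                 count += 1
--                 p.popleft()
--                 s.popleft()
--             else:
--                 break
--
--         if count != 0:
--             answer.append(count)
--
--     return answer
-- ===== SOURCE B (Python) =====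
-- def solution(progresses, speeds):
--     # closed form: finish day per feature (at least 1 day), then one pass grouping
--     # each group = a feature together with the following run of features that finish no later
--     days = [max((100 - p + s - 1) // s, 1) for p, s in zip(progresses, speeds)]
--     answer = []
--     i = 0
--     n = len(days)
--     while i < n:
--         j = i + 1
--         while j < n and days[j] <= days[i]:
--             j += 1
--         answer.append(j - i)
--         i = j
--     return answer
-- ===== Notes on version B (the rewrite author's own statement) =====
-- stated objective: faster
-- what changed: Replaces A's day-by-day deque simulation (add speeds to every remaining feature each day, pop completed prefix) with a closed-form finish day max(ceil((100-p)/s),1) per feature and a single grouping pass over that list; Pre_ excludes non-positive speeds, on which A usually loops forever and B's closed form has no meaning (it divides by the speed), and too-short speed lists, on which A raises IndexError.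
-- outside the precondition, e.g. on solution([150], [0]): A returns [1], B raises ZeroDivisionError; on solution([101, 98], [-1, 1]): A returns [1, 1], B returns [2]
import Mathlib
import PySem

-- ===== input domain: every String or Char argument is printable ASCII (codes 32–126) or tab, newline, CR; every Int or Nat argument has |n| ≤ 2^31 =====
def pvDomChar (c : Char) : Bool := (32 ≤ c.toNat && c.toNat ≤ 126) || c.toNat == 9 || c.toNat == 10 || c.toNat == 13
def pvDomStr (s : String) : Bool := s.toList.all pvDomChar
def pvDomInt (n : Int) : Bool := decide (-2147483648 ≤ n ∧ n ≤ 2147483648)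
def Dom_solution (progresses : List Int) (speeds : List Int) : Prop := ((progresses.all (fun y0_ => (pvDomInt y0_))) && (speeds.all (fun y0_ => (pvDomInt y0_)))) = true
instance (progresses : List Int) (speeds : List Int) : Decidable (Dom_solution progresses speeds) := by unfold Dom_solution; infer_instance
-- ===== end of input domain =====

-- B replaces A's day-by-day deque simulation by a closed-form finish day per feature and one
-- grouping pass (objective: faster, no per-day simulation).

-- ===== PORT A =====
-- inner `while p: if p[0] >= 100: count += 1; popleft both; else break`
def popA : List Int → List Int → Int → Int × List Int × List Int
  | [], s, c => (c, [], s)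
  | x :: xs, s, c => if 100 ≤ x then popA xs s.tail (c + 1) else (c, x :: xs, s)

-- outer `while True` loop of A; the fuel only makes the recursion total: inside Pre_solution
-- the loop breaks after at most 102 + Σ|progress| iterations, so the fuel below never runs out
def loopA (fuel : Nat) (n : Int) (answer p s : List Int) : List Int :=
  match fuel with
  | 0 => answer
  | fuel + 1 =>
    if answer.sum = n then answer
    else
      let p' := List.zipWith (· + ·) p s      -- for i in range(len(p)): p[i] += s[i]
      let r := popA p' s 0
      let answer' := if r.1 ≠ 0 then answer ++ [r.1] else answer
      loopA fuel n answer' r.2.1 r.2.2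

def solution (progresses : List Int) (speeds : List Int) : List Int :=
  loopA (202 + (progresses.map Int.natAbs).sum) (progresses.length : Int) [] progresses speeds

-- ===== PORT B =====
-- Source B's finish day: max((100 - p + s - 1) // s, 1)
def dayB (p s : Int) : Int := max (PySem.Int.floordiv (100 - p + s - 1) s) 1

-- Source B's outer while: one group = days[i] plus the following run of days ≤ days[i];
-- the Nat argument is the loop bound n - i, which is exactly the remaining length
def altGroups : Nat → List Int → List Int
  | 0, _ => []
  | _ + 1, [] => []
  | m + 1, d :: rest =>
      ((1 : Int) + ((rest.takeWhile (fun x => decide (x ≤ d))).length : Int))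
        :: altGroups m (rest.dropWhile (fun x => decide (x ≤ d)))

def solution_alt (progresses : List Int) (speeds : List Int) : List Int :=
  altGroups (List.zipWith dayB progresses speeds).length (List.zipWith dayB progresses speeds)

-- ===== PRECONDITION & SPEC =====
-- Pre_ requires every used speed ≥ 1 and enough speeds: with a speed ≤ 0 A loops forever
-- whenever that feature is still below 100 when it reaches the front (and B's closed form
-- divides by the speed), and with len(speeds) < len(progresses) A raises IndexError.
def Pre_solution (progresses : List Int) (speeds : List Int) : Prop :=
  progresses.length ≤ speeds.length ∧ ∀ s ∈ speeds.take progresses.length, 1 ≤ s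
instance (progresses : List Int) (speeds : List Int) : Decidable (Pre_solution progresses speeds) := by
  unfold Pre_solution; infer_instance

def pvWitness_solution : List Int × List Int := ([93, 30, 55], [1, 30, 5])

def Spec_solution (progresses : List Int) (speeds : List Int) (out : List Int) : Prop := out = solution_alt progresses speeds
instance (progresses : List Int) (speeds : List Int) (out : List Int) : Decidable (Spec_solution progresses speeds out) := by unfold Spec_solution; infer_instance

-- ===== CLAIM (what is proved, stated in full; the proofs are below) =====
def Claim_equal_solution : Prop := ∀ (progresses : List Int) (speeds : List Int), Dom_solution progresses speeds → Pre_solution progresses speeds → Spec_solution progresses speeds (solution progresses speeds)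

-- ===== LEMMAS AND PROOFS =====

-- the day one feature q finishes: max(ceil((100 - p) / s), 1)
def eday (q : Int × Int) : Int := dayB q.1 q.2

lemma dayB_le_iff (p s k : Int) (hs : 1 ≤ s) (hk : 0 ≤ k) :
    dayB p s ≤ k + 1 ↔ 100 ≤ p + (k + 1) * s := by
  have h : PySem.Int.floordiv (100 - p + s - 1) s < k + 2 ↔ 100 - p + s - 1 < (k + 2) * s :=
    PySem.Int.floordiv_lt_iff_lt_mul (by omega)
  unfold dayB
  rw [max_le_iff]
  constructor
  · intro h1
    have h2 := h.mp (by omega)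
    nlinarith
  · intro h1
    have h2 : 100 - p + s - 1 < (k + 2) * s := by nlinarith
    have := h.mpr h2
    omega

lemma one_le_dayB (p s : Int) : 1 ≤ dayB p s := le_max_right _ _

lemma dayB_le_bound (p s : Int) (hs : 1 ≤ s) : dayB p s ≤ 101 + (p.natAbs : Int) := by
  have hM : (0 : Int) ≤ 100 + (p.natAbs : Int) := by positivity
  have h : PySem.Int.floordiv (100 - p + s - 1) s < 100 + (p.natAbs : Int) + 1 ↔
      100 - p + s - 1 < (100 + (p.natAbs : Int) + 1) * s :=
    PySem.Int.floordiv_lt_iff_lt_mul (by omega)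
  have habs : -(p.natAbs : Int) ≤ p := by
    rcases Int.natAbs_eq p with he | he <;> omega
  have h2 : 100 - p + s - 1 < (100 + (p.natAbs : Int) + 1) * s := by nlinarith
  have := h.mpr h2
  unfold dayB
  omega

lemma popA_map (f : Int × Int → Int) (xs : List (Int × Int)) (extra : List Int) (c : Int) :
    popA (xs.map f) (xs.map Prod.snd ++ extra) c =
      (c + ((xs.takeWhile (fun q => decide (100 ≤ f q))).length : Int),
       (xs.dropWhile (fun q => decide (100 ≤ f q))).map f,
       (xs.dropWhile (fun q => decide (100 ≤ f q))).map Prod.snd ++ extra) := by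
  induction xs generalizing c with
  | nil => simp [popA]
  | cons q t ih =>
    by_cases h : 100 ≤ f q
    · simp [popA, h, ih]
      omega
    · simp [popA, h]

lemma zipWith_map_same {α β : Type} (f : β → β → β) (g h : α → β) (xs : List α) (extra : List β) :
    List.zipWith f (xs.map g) (xs.map h ++ extra) = xs.map (fun x => f (g x) (h x)) := by
  induction xs with
  | nil => rfl
  | cons x t ih => simp [ih]

lemma head?_dropWhile {α : Type} (p : α → Bool) (l : List α) (x : α)
    (h : (l.dropWhile p).head? = some x) : p x = false := by
  induction l with
  | nil => simp [List.dropWhile] at h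
  | cons a t ih =>
    rw [List.dropWhile_cons] at h
    by_cases hp : p a
    · simp [hp] at h; exact ih h
    · simp [hp] at h; subst h; simpa using hp

lemma takeWhile_congr' {α : Type} (p q : α → Bool) (l : List α)
    (h : ∀ x ∈ l, p x = q x) : l.takeWhile p = l.takeWhile q ∧ l.dropWhile p = l.dropWhile q := by
  induction l with
  | nil => simp
  | cons a t ih =>
    have ha := h a (by simp)
    have ht := ih (fun x hx => h x (by simp [hx]))
    by_cases hp : p a
    · simp [hp, ← ha, ht.1, ht.2]
    · simp [hp, ← ha]

-- extra fuel is irrelevant once it covers the list length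
lemma altGroups_congr (m : Nat) : ∀ (m' : Nat) (l : List Int),
    l.length ≤ m → l.length ≤ m' → altGroups m l = altGroups m' l := by
  induction m with
  | zero =>
    intro m' l h _
    have : l = [] := List.eq_nil_of_length_eq_zero (Nat.le_zero.mp h)
    subst this
    cases m' <;> rfl
  | succ m ih =>
    intro m' l h h'
    cases l with
    | nil => cases m' <;> rfl
    | cons d rest =>
      cases m' with
      | zero => simp at h'
      | succ m' =>
        simp only [altGroups]
        congr 1
        exact ih m' _ (Nat.le_of_succ_le_succ
            (Nat.lt_succ_of_le (le_trans (List.length_dropWhile_le _ _) (by simpa using h))))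
          (Nat.le_of_succ_le_succ
            (Nat.lt_succ_of_le (le_trans (List.length_dropWhile_le _ _) (by simpa using h'))))

lemma altGroups_succ (m : Nat) (d : Int) (rest : List Int) :
    altGroups (m + 1) (d :: rest)
      = ((1 : Int) + ((rest.takeWhile (fun x => decide (x ≤ d))).length : Int))
          :: altGroups m (rest.dropWhile (fun x => decide (x ≤ d))) := rfl

lemma key (fuel : Nat) (k : Int) (xs : List (Int × Int)) (extra : List Int)
    (answer : List Int) (n : Int)
    (hk : 0 ≤ k)
    (hs : ∀ q ∈ xs, 1 ≤ q.2)
    (hhead : ∀ q ∈ xs.head?, k < eday q)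
    (hfuel : ∀ q ∈ xs, eday q < k + fuel)
    (hsum : answer.sum = n - xs.length) :
    loopA fuel n answer (xs.map (fun q => q.1 + k * q.2)) (xs.map Prod.snd ++ extra)
      = answer ++ altGroups (xs.map eday).length (xs.map eday) := by
  induction fuel generalizing k xs extra answer with
  | zero =>
    cases xs with
    | nil => simp [loopA, altGroups]
    | cons q t =>
      exfalso
      have h1 := hhead q (by simp)
      have h2 := hfuel q (by simp)
      omega
  | succ fuel ih =>
    cases xs with
    | nil => simp [loopA, altGroups, hsum]
    | cons q t =>
      have hne : answer.sum ≠ n := by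
        have hl : ((q :: t).length : Int) = (t.length : Int) + 1 := by
          simp [List.length_cons]
        omega
      rw [loopA]
      simp only [if_neg hne]
      rw [zipWith_map_same]
      have hadd : (fun x : Int × Int => x.1 + k * x.2 + x.2) = (fun x : Int × Int => x.1 + (k + 1) * x.2) := by
        funext x; ring
      rw [hadd, popA_map]
      -- the pop predicate is exactly "finish day ≤ k+1"
      have hcong := takeWhile_congr' (fun x : Int × Int => decide (100 ≤ x.1 + (k + 1) * x.2))
        (fun x : Int × Int => decide (eday x ≤ k + 1)) (q :: t)
        (by
          intro x hx
          have := dayB_le_iff x.1 x.2 k (hs x hx) hk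
          simp [eday, this])
      rw [hcong.1, hcong.2]
      have hdq : k < eday q := hhead q (by simp)
      by_cases hd : eday q ≤ k + 1
      · -- the head pops on day k+1 = eday q
        have hdq1 : eday q = k + 1 := by omega
        rw [List.takeWhile_cons, List.dropWhile_cons]
        simp only [hd, decide_true]
        set tw := t.takeWhile (fun x => decide (eday x ≤ k + 1)) with htw
        set dw := t.dropWhile (fun x => decide (eday x ≤ k + 1)) with hdw
        have hcount : (0 : Int) + ((q :: tw).length : Int) = 1 + (tw.length : Int) := by
          simp; omega
        have hlen : t.length = tw.length + dw.length := by
          rw [htw, hdw, ← List.length_append, List.takeWhile_append_dropWhile]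
        have hstep := ih (k + 1) dw extra (answer ++ [(0 : Int) + ((q :: tw).length : Int)])
          (by omega)
          (fun x hx => hs x (by simp [(List.dropWhile_sublist _).subset (hdw ▸ hx)]))
          (by
            intro x hx
            have hxh : (t.dropWhile (fun x => decide (eday x ≤ k + 1))).head? = some x := hdw ▸ hx
            have := head?_dropWhile _ _ _ hxh
            simp at this; omega)
          (fun x hx => by
            have hxm : x ∈ t := (List.dropWhile_sublist _).subset (hdw ▸ hx)
            have := hfuel x (by simp [hxm]); omega)
          (by
            simp [List.sum_append, hsum, hlen]
            push_cast; ring)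
        have hcnz : ((0 : Int) + ((q :: tw).length : Int)) ≠ 0 := by simp; omega
        simp only [hcnz, if_pos, ne_eq, not_false_eq_true]
        rw [hstep]
        -- now compute altGroups on the day list
        have hmap_tw : tw.map eday = (t.map eday).takeWhile (fun x => decide (x ≤ eday q)) := by
          rw [List.takeWhile_map, htw, hdq1]
          rfl
        have hmap_dw : dw.map eday = (t.map eday).dropWhile (fun x => decide (x ≤ eday q)) := by
          rw [List.dropWhile_map, hdw, hdq1]
          rfl
        simp only [List.map_cons, List.length_cons, altGroups_succ]
        rw [← hmap_tw, ← hmap_dw, List.append_assoc]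
        have hfu : altGroups (dw.map eday).length (dw.map eday)
            = altGroups (t.map eday).length (dw.map eday) := by
          apply altGroups_congr <;> simp [hlen]
        rw [hfu]
        simp [List.length_map]
        omega
      · -- nothing finishes on day k+1
        have h0 : (q :: t).takeWhile (fun x => decide (eday x ≤ k + 1)) = [] := by
          rw [List.takeWhile_cons]
          simp [hd]
        have h0' : (q :: t).dropWhile (fun x => decide (eday x ≤ k + 1)) = q :: t := by
          rw [List.dropWhile_cons]
          simp [hd]
        rw [h0, h0']
        simp only [List.length_nil]
        have hstep := ih (k + 1) (q :: t) extra answer (by omega) hs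
          (by intro x hx; simp at hx; subst hx; omega)
          (fun x hx => by have := hfuel x hx; omega)
          hsum
        simpa using hstep

lemma zip_decomp : ∀ (ps ss : List Int), ps.length ≤ ss.length →
    ps = (ps.zip ss).map Prod.fst ∧ ss = (ps.zip ss).map Prod.snd ++ ss.drop ps.length := by
  intro ps
  induction ps with
  | nil => intro ss _; simp
  | cons p pt ih =>
    intro ss hl
    cases ss with
    | nil => simp at hl
    | cons s st =>
      have := ih st (by simpa using hl)
      simp only [List.zip_cons_cons, List.map_cons, List.length_cons, List.drop_succ_cons]
      exact ⟨by rw [← this.1], congrArg (List.cons s) this.2⟩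

lemma map_zip_eq_zipWith {α β γ : Type} (f : α × β → γ) (l₁ : List α) (l₂ : List β) :
    (l₁.zip l₂).map f = List.zipWith (fun a b => f (a, b)) l₁ l₂ := by
  induction l₁ generalizing l₂ with
  | nil => simp
  | cons a t ih => cases l₂ <;> simp [List.zip_cons_cons, ih]

lemma natAbs_le_sum (x : Int) (l : List Int) (hx : x ∈ l) :
    x.natAbs ≤ (l.map Int.natAbs).sum := by
  induction l with
  | nil => simp at hx
  | cons a t ih =>
    rcases List.mem_cons.mp hx with h | h
    · subst h; simp
    · have := ih h
      simp
      omega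

-- ===== VERDICT (by name: the statement is the Claim_ definition above) =====
theorem solution_spec : Claim_equal_solution := by
  intro progresses speeds _ hpre
  obtain ⟨hlen, hsp⟩ := hpre
  unfold Spec_solution solution solution_alt
  obtain ⟨hfst, hsnd⟩ := zip_decomp progresses speeds hlen
  set xs := progresses.zip speeds with hxs
  have hmem : ∀ q ∈ xs, q.1 ∈ progresses ∧ 1 ≤ q.2 := by
    intro q hq
    obtain ⟨h1, h2⟩ := List.of_mem_zip (hxs ▸ hq)
    refine ⟨h1, hsp q.2 ?_⟩
    -- q.2 is among the first progresses.length speeds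
    have : q.2 ∈ xs.map Prod.snd := List.mem_map_of_mem hq
    have hts : speeds.take progresses.length = xs.map Prod.snd := by
      have h1' : (speeds.take progresses.length) ++ speeds.drop progresses.length = speeds :=
        List.take_append_drop _ _
      have h2' : xs.map Prod.snd ++ speeds.drop progresses.length = speeds := hsnd.symm
      have hlen' : (speeds.take progresses.length).length = (xs.map Prod.snd).length := by
        simp [hxs, List.length_zip]
      exact List.append_inj_left (h1'.trans h2'.symm) hlen'
    rw [hts]
    exact this
  have hkey := key (202 + (progresses.map Int.natAbs).sum) 0 xs (speeds.drop progresses.length)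
    [] (progresses.length : Int) le_rfl
    (fun q hq => (hmem q hq).2)
    (by
      intro q hq
      have := one_le_dayB q.1 q.2
      simp only [eday]
      omega)
    (by
      intro q hq
      obtain ⟨hp, hs1⟩ := hmem q hq
      have hb := dayB_le_bound q.1 q.2 hs1
      have hab := natAbs_le_sum q.1 (progresses) hp
      simp only [eday]
      omega)
    (by
      simp [hxs, List.length_zip]
      omega)
  have hmap0 : xs.map (fun q : Int × Int => q.1 + 0 * q.2) = progresses := by
    have : xs.map (fun q : Int × Int => q.1 + 0 * q.2) = xs.map Prod.fst := by
      apply List.map_congr_left; intro x _; ring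
    rw [this, ← hfst]
  rw [hmap0, ← hsnd] at hkey
  rw [hkey]
  simp only [List.nil_append]
  have hdays : xs.map eday = List.zipWith dayB progresses speeds := by
    rw [hxs, map_zip_eq_zipWith]
    rfl
  rw [hdays]
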